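-- pv_equiv track=rewrite | github.com/lita-nguyen/genetic-algorithm-timetable | core/fitness.py | fitness
-- ===== SOURCE A (Python) =====
-- from collections import defaultdict, Counter
--
-- def fitness(schedule, student_row, popularity):
--     penalty = 0
--     reward = 0
--     day_slots = defaultdict(list)
--     seen = set()
--
--     for course, (day, slot) in schedule.items():
--         if (day, slot) in seen:
--             return 0, -1000
--
--         seen.add((day, slot))
--         reward += popularity.get((day, slot), 0)
--         day_slots[day].append(slot)
--
--     if sum(len(day_slots[d]) for d in [4, 5]) > sum(len(day_slots[d]) for d in [0, 1, 2, 3]):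
--         penalty -= 50
--
--     for slots in day_slots.values():
--         slots = sorted(slots)
--         if len(slots) >= 4:
--             for i in range(len(slots) - 3):
--                 if slots[i:i+4] == [1, 2, 3, 4]:
--                     penalty -= 150
--                     break
--     return reward, penalty
-- ===== SOURCE B (Python) =====
-- def fitness(schedule, student_row, popularity):
--     pairs = list(schedule.values())
--     if len(set(pairs)) != len(pairs):
--         return 0, -1000
--     reward = sum(popularity.get(p, 0) for p in pairs)
--     days = [d for d, _ in pairs]
--     penalty = -50 if sum(d in (4, 5) for d in days) > sum(d in (0, 1, 2, 3) for d in days) else 0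
--     by_day = {}
--     for d, s in pairs:
--         by_day.setdefault(d, set()).add(s)
--     penalty -= 150 * sum({1, 2, 3, 4} <= slots for slots in by_day.values())
--     return reward, penalty
-- ===== Notes on version B (the rewrite author's own statement) =====
-- stated objective: simpler
-- what changed: Replaces the early-return scanning pass and the per-day sorted()+sliding-window scan with whole-list operations: a global set-cardinality duplicate test, a comprehension sum for the reward, boolean-sum day counts for the weekend penalty, and per-day slot SETS judged by a {1,2,3,4} subset test (valid because slots within a day are distinct once the duplicate test passed), removing the sort and the inner window loop.
import Mathlib
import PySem

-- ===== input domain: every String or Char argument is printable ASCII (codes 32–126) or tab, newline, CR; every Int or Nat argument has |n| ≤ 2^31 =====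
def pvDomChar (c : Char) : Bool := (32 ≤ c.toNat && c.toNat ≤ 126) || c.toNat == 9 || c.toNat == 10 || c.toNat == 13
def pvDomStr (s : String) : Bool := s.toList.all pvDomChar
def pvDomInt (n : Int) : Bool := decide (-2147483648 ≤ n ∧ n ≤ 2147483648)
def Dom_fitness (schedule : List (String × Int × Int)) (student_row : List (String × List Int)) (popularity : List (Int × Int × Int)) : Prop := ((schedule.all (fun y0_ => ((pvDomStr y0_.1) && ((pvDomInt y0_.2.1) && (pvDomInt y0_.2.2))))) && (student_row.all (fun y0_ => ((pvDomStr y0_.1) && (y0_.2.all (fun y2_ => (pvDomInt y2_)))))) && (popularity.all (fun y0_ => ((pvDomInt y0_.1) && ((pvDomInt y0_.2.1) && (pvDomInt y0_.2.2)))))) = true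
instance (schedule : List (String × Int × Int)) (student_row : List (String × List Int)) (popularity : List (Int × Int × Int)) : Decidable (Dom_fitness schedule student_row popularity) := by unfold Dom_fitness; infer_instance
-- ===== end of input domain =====

-- B replaces A's early-return scanning pass and per-day sorted()+window scan by whole-list set/count
-- operations (objective: simpler). Equivalence of the return values is proved below.

-- ===== PORT A =====
-- the body of A's 'for slots in day_slots.values()' iteration: sorted() then the window scan;
-- the 'break' fires at most once after 'penalty -= 150', so the scan is the existence test ported by .any
def fitnessRun (slots : List Int) : Bool :=
  let s := PySem.List.sorted slots (fun x => x) false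
  if 4 ≤ s.length then
    (PySem.List.pyRange 0 (PySem.List.len s - 3) 1).any
      (fun i => PySem.List.slice s (some i) (some (i + 4)) == ([1, 2, 3, 4] : List Int))
  else false

-- the 'for course, (day, slot) in schedule.items()' loop; 'none' is the early 'return 0, -1000';
-- day_slots[day].append(slot) on the defaultdict is Dict.modify with default []
def fitnessLoop (popD : PySem.Dict (Int × Int) Int) :
    List (String × Int × Int) → PySem.Set (Int × Int) → Int → PySem.Dict Int (List Int) →
    Option (Int × PySem.Dict Int (List Int))
  | [], _, reward, ds => some (reward, ds)
  | it :: rest, seen, reward, ds =>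
    if PySem.Set.contains seen it.2 then none
    else fitnessLoop popD rest (PySem.Set.add seen it.2) (reward + popD.getD it.2 0)
           (ds.modify it.2.1 [] (fun l => l ++ [it.2.2]))

def fitness (schedule : List (String × Int × Int)) (student_row : List (String × List Int)) (popularity : List (Int × Int × Int)) : Int × Int :=
  -- the dict arguments, decoded with Python's dict construction (later duplicate key overwrites in place)
  let sd : PySem.Dict String (Int × Int) := schedule.foldl (fun d t => d.insert t.1 t.2) PySem.Dict.empty
  let popD : PySem.Dict (Int × Int) Int := popularity.foldl (fun d t => d.insert (t.1, t.2.1) t.2.2) PySem.Dict.empty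
  match fitnessLoop popD sd.items PySem.Set.empty 0 PySem.Dict.empty with
  | none => (0, -1000)
  | some (reward, daySlots) =>
    let penalty : Int := 0
    -- 'day_slots[d]' on the defaultdict inserts an empty list for a missing d; that side effect only adds
    -- length-0 value lists, which the fitnessRun fold below ignores, so getD is exact for the return value
    let penalty := if ([4, 5].map (fun d => (daySlots.getD d []).length)).sum >
        ([0, 1, 2, 3].map (fun d => (daySlots.getD d []).length)).sum then penalty - 50 else penalty
    let penalty := daySlots.values.foldl (fun pen slots => if fitnessRun slots then pen - 150 else pen) penalty
    (reward, penalty)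

-- ===== PORT B =====
def fitness_alt (schedule : List (String × Int × Int)) (student_row : List (String × List Int)) (popularity : List (Int × Int × Int)) : Int × Int :=
  let sd : PySem.Dict String (Int × Int) := schedule.foldl (fun d t => d.insert t.1 t.2) PySem.Dict.empty
  let popD : PySem.Dict (Int × Int) Int := popularity.foldl (fun d t => d.insert (t.1, t.2.1) t.2.2) PySem.Dict.empty
  let pairs := sd.values
  if (PySem.Set.ofList pairs).length ≠ pairs.length then (0, -1000)
  else
    let reward := (pairs.map (fun p => popD.getD p 0)).sum
    let days := pairs.map (fun p => p.1)
    let penalty : Int := if days.countP (fun d => d == 4 || d == 5) >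
        days.countP (fun d => d == 0 || d == 1 || d == 2 || d == 3) then -50 else 0
    -- by_day.setdefault(d, set()).add(s) is Dict.modify with default set()
    let byDay : PySem.Dict Int (PySem.Set Int) :=
      pairs.foldl (fun d p => d.modify p.1 PySem.Set.empty (fun s => PySem.Set.add s p.2)) PySem.Dict.empty
    let penalty := penalty -
      150 * (byDay.values.countP (fun s => PySem.Set.issubset (PySem.Set.ofList [1, 2, 3, 4]) s) : Int)
    (reward, penalty)

-- ===== PRECONDITION & SPEC =====
def Spec_fitness (schedule : List (String × Int × Int)) (student_row : List (String × List Int)) (popularity : List (Int × Int × Int)) (out : Int × Int) : Prop := out = fitness_alt schedule student_row popularity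
instance (schedule : List (String × Int × Int)) (student_row : List (String × List Int)) (popularity : List (Int × Int × Int)) (out : Int × Int) : Decidable (Spec_fitness schedule student_row popularity out) := by unfold Spec_fitness; infer_instance

-- ===== CLAIM (what is proved, stated in full; the proofs are below) =====
def Claim_equal_fitness : Prop := ∀ (schedule : List (String × Int × Int)) (student_row : List (String × List Int)) (popularity : List (Int × Int × Int)), Dom_fitness schedule student_row popularity → Spec_fitness schedule student_row popularity (fitness schedule student_row popularity)

-- ===== LEMMAS AND PROOFS =====

-- the whole scanning loop of A, characterised: it early-returns iff the (day, slot) pairs are not distinct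
lemma fitnessLoop_eq (popD : PySem.Dict (Int × Int) Int) (items : List (String × Int × Int)) :
    ∀ (seen : PySem.Set (Int × Int)) (reward : Int) (ds : PySem.Dict Int (List Int)),
    fitnessLoop popD items seen reward ds =
      if (items.map (fun it => it.2)).Nodup ∧ (∀ p ∈ items.map (fun it => it.2), p ∉ seen)
      then some (reward + ((items.map (fun it => it.2)).map (fun p => popD.getD p 0)).sum,
                 (items.map (fun it => it.2)).foldl (fun d p => d.modify p.1 [] (fun l => l ++ [p.2])) ds)
      else none := by
  induction items with
  | nil => intro seen reward ds; simp [fitnessLoop]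
  | cons it rest ih =>
    intro seen reward ds
    simp only [fitnessLoop]
    by_cases hm : it.2 ∈ seen
    · rw [if_pos ((PySem.Set.contains_iff seen it.2).mpr hm)]
      rw [if_neg]
      rintro ⟨-, hall⟩
      exact hall it.2 (by simp) hm
    · rw [if_neg (by simp [hm])]
      rw [ih]
      have hiff : ((rest.map (fun it => it.2)).Nodup ∧
            (∀ p ∈ rest.map (fun it => it.2), p ∉ PySem.Set.add seen it.2)) ↔
          (((it :: rest).map (fun it => it.2)).Nodup ∧
            (∀ p ∈ (it :: rest).map (fun it => it.2), p ∉ seen)) := by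
        simp only [List.map_cons, List.nodup_cons, List.mem_cons]
        constructor
        · rintro ⟨hnd, hall⟩
          refine ⟨⟨fun hmem => (hall _ hmem) ((PySem.Set.mem_add seen it.2 it.2).mpr (Or.inr rfl)), hnd⟩, ?_⟩
          rintro p (rfl | hp)
          · exact hm
          · exact fun hps => (hall p hp) ((PySem.Set.mem_add seen it.2 p).mpr (Or.inl hps))
        · rintro ⟨⟨hni, hnd⟩, hall⟩
          refine ⟨hnd, fun p hp hmem => ?_⟩
          rcases (PySem.Set.mem_add seen it.2 p).mp hmem with hps | rfl
          · exact hall p (Or.inr hp) hps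
          · exact hni hp
      by_cases hc : ((it :: rest).map (fun it => it.2)).Nodup ∧
          (∀ p ∈ (it :: rest).map (fun it => it.2), p ∉ seen)
      · rw [if_pos (hiff.mpr hc), if_pos hc]
        simp [add_assoc]
      · rw [if_neg (fun h => hc (hiff.mp h)), if_neg hc]

lemma filter_ne_length_lt {α : Type} [BEq α] [LawfulBEq α] (l : List α) (x : α) (h : x ∈ l) :
    (l.filter (fun y => !(y == x))).length < l.length := by
  induction l with
  | nil => cases h
  | cons a t ih =>
    by_cases hax : a = x
    · subst hax
      simp only [List.filter_cons, beq_self_eq_true, Bool.not_true, Bool.false_eq_true,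
        if_false, List.length_cons]
      exact Nat.lt_succ_of_le (List.length_filter_le _ _)
    · have hxt : x ∈ t := by
        rcases List.mem_cons.mp h with h' | h'
        · exact absurd h'.symm hax
        · exact h'
      have hb : (a == x) = false := beq_eq_false_iff_ne.mpr hax
      simp only [List.filter_cons, hb, Bool.not_false, if_true, List.length_cons]
      exact Nat.succ_lt_succ (ih hxt)

-- len(set(xs)) == len(xs) iff xs has no duplicates
lemma ofList_length_eq_iff_nodup {α : Type} [BEq α] [LawfulBEq α] (xs : List α) :
    (PySem.Set.ofList xs).length = xs.length ↔ xs.Nodup := by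
  constructor
  · intro h
    by_contra hnd
    suffices hlt : (PySem.Set.ofList xs).length < xs.length by omega
    clear h
    induction xs with
    | nil => exact absurd List.nodup_nil hnd
    | cons x t ih =>
      rw [PySem.Set.ofList_cons]
      by_cases hx : x ∈ t
      · have hx' : x ∈ PySem.Set.ofList t := (PySem.Set.mem_ofList t x).mpr hx
        have h1 : (((PySem.Set.ofList t).discard x).length) < (PySem.Set.ofList t).length := by
          simpa [PySem.Set.discard] using filter_ne_length_lt (PySem.Set.ofList t) x hx'
        have h2 := PySem.Set.length_ofList_le t
        simp only [List.length_cons]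
        omega
      · have hnd' : ¬ t.Nodup := fun h => hnd (List.nodup_cons.mpr ⟨hx, h⟩)
        have h1 : (((PySem.Set.ofList t).discard x).length) ≤ (PySem.Set.ofList t).length := by
          simpa [PySem.Set.discard] using List.length_filter_le (fun y => !(y == x)) (PySem.Set.ofList t)
        have h2 := ih hnd'
        simp only [List.length_cons]
        omega
  · intro h
    rw [PySem.Set.ofList_eq_self_of_nodup xs h]

-- counting a disjunction of disjoint tests = sum of the two counts
lemma countP_or_disjoint {α : Type} (l : List α) (p q : α → Bool)
    (h : ∀ x ∈ l, ¬(p x = true ∧ q x = true)) :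
    l.countP (fun x => p x || q x) = l.countP p + l.countP q := by
  induction l with
  | nil => simp
  | cons a t ih =>
    have ht := ih (fun x hx => h x (List.mem_cons_of_mem a hx))
    have ha := h a (List.mem_cons_self)
    by_cases hp : p a = true <;> by_cases hq : q a = true <;>
      simp [List.countP_cons, hp, hq, ht] at * <;> omega

-- A's penalty fold is -150 per value satisfying the test
lemma foldl_if_sub (c : List Int → Bool) (L : List (List Int)) :
    ∀ (init : Int), L.foldl (fun pen slots => if c slots then pen - 150 else pen) init
      = init - 150 * (L.countP c : Int) := by
  induction L with
  | nil => intro init; simp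
  | cons a t ih =>
    intro init
    simp only [List.foldl_cons, List.countP_cons]
    by_cases hc : c a = true
    · rw [if_pos hc, ih, if_pos hc]
      push_cast
      ring
    · rw [if_neg hc, ih, if_neg hc]
      push_cast
      ring

-- B's by_day fold, characterised per key
lemma byDay_getD (l : List (Int × Int)) :
    ∀ (d : PySem.Dict Int (PySem.Set Int)) (c : Int),
    (l.foldl (fun d p => d.modify p.1 PySem.Set.empty (fun s => PySem.Set.add s p.2)) d).getD c PySem.Set.empty
      = PySem.Set.update (d.getD c PySem.Set.empty) ((l.filter (fun p => p.1 == c)).map (fun p => p.2)) := by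
  induction l with
  | nil => intro d c; simp [PySem.Set.update_nil]
  | cons p t ih =>
    intro d c
    simp only [List.foldl_cons]
    rw [ih]
    by_cases hpc : p.1 = c
    · have hb : (p.1 == c) = true := beq_iff_eq.mpr hpc
      rw [List.filter_cons, if_pos hb]
      rw [PySem.Dict.getD_modify d p.1 c PySem.Set.empty]
      rw [if_pos hpc.symm, hpc]
      simp [PySem.Set.update_cons]
    · have hb : (p.1 == c) = false := beq_eq_false_iff_ne.mpr hpc
      rw [List.filter_cons, if_neg (by simp [hb])]
      rw [PySem.Dict.getD_modify d p.1 c PySem.Set.empty]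
      rw [if_neg (fun h => hpc h.symm)]

-- a strictly increasing list whose members are bounded below by a member c starts with c
lemma chain_head (c : Int) (s : List Int) (h : s.Pairwise (· < ·)) (hm : c ∈ s)
    (hlb : ∀ y ∈ s, c ≤ y) :
    ∃ t, s = c :: t ∧ t.Pairwise (· < ·) ∧ ∀ y ∈ t, c < y := by
  cases s with
  | nil => cases hm
  | cons x t =>
    have hx := List.pairwise_cons.mp h
    rcases List.mem_cons.mp hm with rfl | hct
    · exact ⟨t, rfl, hx.2, hx.1⟩
    · have h1 := hx.1 c hct
      have h2 := hlb x List.mem_cons_self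
      omega

-- a strictly increasing list containing 1,2,3,4 carries them as a contiguous window
lemma consec4 (s : List Int) (hs : s.Pairwise (· < ·))
    (h1 : (1 : Int) ∈ s) (h2 : (2 : Int) ∈ s) (h3 : (3 : Int) ∈ s) (h4 : (4 : Int) ∈ s) :
    ∃ i : Nat, i + 4 ≤ s.length ∧ (s.drop i).take 4 = [1, 2, 3, 4] := by
  induction s with
  | nil => cases h1
  | cons x t ih =>
    have hx := List.pairwise_cons.mp hs
    by_cases hlt : x < 1
    · have m1 : (1 : Int) ∈ t := by rcases List.mem_cons.mp h1 with h | h; omega; exact h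
      have m2 : (2 : Int) ∈ t := by rcases List.mem_cons.mp h2 with h | h; omega; exact h
      have m3 : (3 : Int) ∈ t := by rcases List.mem_cons.mp h3 with h | h; omega; exact h
      have m4 : (4 : Int) ∈ t := by rcases List.mem_cons.mp h4 with h | h; omega; exact h
      obtain ⟨i, hi, hw⟩ := ih hx.2 m1 m2 m3 m4
      exact ⟨i + 1, by simpa using hi, by simpa using hw⟩
    · have hx1 : x = 1 := by
        rcases List.mem_cons.mp h1 with h | h
        · omega
        · have := hx.1 1 h; omega
      subst hx1
      have m2 : (2 : Int) ∈ t := by rcases List.mem_cons.mp h2 with h | h; omega; exact h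
      obtain ⟨t2, ht2, hp2, hgt2⟩ :=
        chain_head 2 t hx.2 m2 (fun y hy => by have := hx.1 y hy; omega)
      have m3 : (3 : Int) ∈ t2 := by
        have h3t : (3 : Int) ∈ t := by rcases List.mem_cons.mp h3 with h | h; omega; exact h
        rw [ht2] at h3t
        rcases List.mem_cons.mp h3t with h | h; omega; exact h
      obtain ⟨t3, ht3, hp3, hgt3⟩ :=
        chain_head 3 t2 hp2 m3 (fun y hy => by have := hgt2 y hy; omega)
      have m4 : (4 : Int) ∈ t3 := by
        have h4t : (4 : Int) ∈ t := by rcases List.mem_cons.mp h4 with h | h; omega; exact h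
        rw [ht2] at h4t
        rcases List.mem_cons.mp h4t with h | h
        · omega
        · rw [ht3] at h
          rcases List.mem_cons.mp h with h' | h'; omega; exact h'
      obtain ⟨t4, ht4, -, -⟩ :=
        chain_head 4 t3 hp3 m4 (fun y hy => by have := hgt3 y hy; omega)
      refine ⟨0, ?_, ?_⟩
      · rw [ht2, ht3, ht4]; simp
      · rw [ht2, ht3, ht4]; simp

-- A's sorted-window test on a duplicate-free list is membership of 1,2,3,4
lemma fitnessRun_iff (slots : List Int) (hnd : slots.Nodup) :
    fitnessRun slots = true ↔
      ((1 : Int) ∈ slots ∧ (2 : Int) ∈ slots ∧ (3 : Int) ∈ slots ∧ (4 : Int) ∈ slots) := by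
  have hperm := PySem.List.sorted_perm slots (fun x => x) false
  set s := PySem.List.sorted slots (fun x => x) false with hsdef
  have hsnd : s.Nodup := hperm.nodup_iff.mpr hnd
  have hpw : s.Pairwise (· < ·) := by
    have hle : s.Pairwise (fun a b => a ≤ b) := PySem.List.sorted_pairwise slots (fun x => x)
    exact (hle.and hsnd).imp (fun h => lt_of_le_of_ne h.1 h.2)
  have hmem : ∀ z : Int, z ∈ s ↔ z ∈ slots := fun z => hperm.mem_iff
  constructor
  · intro h
    simp only [fitnessRun, ← hsdef] at h
    by_cases hlen : 4 ≤ s.length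
    swap
    · rw [if_neg hlen] at h
      cases h
    · rw [if_pos hlen] at h
      obtain ⟨i, hiR, hieq⟩ := List.any_eq_true.mp h
      obtain ⟨hi0, hiu⟩ := PySem.List.mem_pyRange_one.mp hiR
      have hsl : PySem.List.slice s (some i) (some (i + 4)) = [1, 2, 3, 4] := beq_iff_eq.mp hieq
      rw [PySem.List.slice_toNat s hi0 (by omega)] at hsl
      have hsub : ∀ z : Int, z ∈ [(1 : Int), 2, 3, 4] → z ∈ s := by
        intro z hz
        rw [← hsl] at hz
        exact List.mem_of_mem_drop (List.mem_of_mem_take hz)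
      refine ⟨?_, ?_, ?_, ?_⟩ <;> rw [← hmem] <;> exact hsub _ (by simp)
  · rintro ⟨m1, m2, m3, m4⟩
    obtain ⟨i, hi, hw⟩ := consec4 s hpw ((hmem 1).mpr m1) ((hmem 2).mpr m2)
      ((hmem 3).mpr m3) ((hmem 4).mpr m4)
    simp only [fitnessRun, ← hsdef]
    rw [if_pos (by omega)]
    apply List.any_eq_true.mpr
    refine ⟨(i : Int), ?_, ?_⟩
    · apply PySem.List.mem_pyRange_one.mpr
      refine ⟨by omega, ?_⟩
      simp only [PySem.List.len_eq]
      omega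
    · apply beq_iff_eq.mpr
      rw [PySem.List.slice_toNat s (by omega) (by omega)]
      have ht : ((i : Int) + 4).toNat = i + 4 := by omega
      have ht2 : ((i : Int)).toNat = i := by omega
      rw [ht, ht2]
      simpa using hw

-- the shared body of the two ports, parametrised over the two decoded dict arguments
lemma fitness_core (sd : PySem.Dict String (Int × Int)) (popD : PySem.Dict (Int × Int) Int) :
    (match fitnessLoop popD sd.items PySem.Set.empty 0 PySem.Dict.empty with
      | none => ((0 : Int), (-1000 : Int))
      | some (reward, daySlots) =>
        let penalty : Int := 0
        let penalty := if ([4, 5].map (fun d => (daySlots.getD d []).length)).sum >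
            ([0, 1, 2, 3].map (fun d => (daySlots.getD d []).length)).sum then penalty - 50 else penalty
        let penalty := daySlots.values.foldl
            (fun pen slots => if fitnessRun slots then pen - 150 else pen) penalty
        (reward, penalty)) =
    (let pairs := sd.values
     if (PySem.Set.ofList pairs).length ≠ pairs.length then ((0 : Int), (-1000 : Int))
     else
       let reward := (pairs.map (fun p => popD.getD p 0)).sum
       let days := pairs.map (fun p => p.1)
       let penalty : Int := if days.countP (fun d => d == 4 || d == 5) >
           days.countP (fun d => d == 0 || d == 1 || d == 2 || d == 3) then -50 else 0
       let byDay : PySem.Dict Int (PySem.Set Int) :=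
         pairs.foldl (fun d p => d.modify p.1 PySem.Set.empty (fun s => PySem.Set.add s p.2)) PySem.Dict.empty
       let penalty := penalty -
         150 * (byDay.values.countP (fun s => PySem.Set.issubset (PySem.Set.ofList [1, 2, 3, 4]) s) : Int)
       (reward, penalty)) := by
  have hv : sd.values = sd.items.map (fun it => it.2) := rfl
  by_cases hnd : (sd.items.map (fun it => it.2)).Nodup
  case pos =>
    have hloop : fitnessLoop popD sd.items PySem.Set.empty 0 PySem.Dict.empty =
        some (0 + ((sd.items.map (fun it => it.2)).map (fun p => popD.getD p 0)).sum,
          (sd.items.map (fun it => it.2)).foldl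
            (fun d p => d.modify p.1 [] (fun l => l ++ [p.2])) PySem.Dict.empty) := by
      rw [fitnessLoop_eq]
      exact if_pos ⟨hnd, fun p _ hp => List.not_mem_nil hp⟩
    have hlen : ¬ (PySem.Set.ofList (sd.items.map (fun it => it.2))).length ≠
        (sd.items.map (fun it => it.2)).length :=
      fun h => h ((ofList_length_eq_iff_nodup _).mpr hnd)
    simp only [hloop, hv]
    rw [if_neg hlen]
    set pairs := sd.items.map (fun it => it.2) with hpairs
    set ds0 := pairs.foldl (fun d p => d.modify p.1 [] (fun l => l ++ [p.2])) PySem.Dict.empty with hds0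
    set byDay := pairs.foldl
      (fun d p => d.modify p.1 PySem.Set.empty (fun s => PySem.Set.add s p.2)) PySem.Dict.empty with hbd
    have hgetA : ∀ c : Int, ds0.getD c [] = (pairs.filter (fun p => p.1 == c)).map (fun p => p.2) := by
      intro c
      rw [hds0, PySem.Dict.getD_foldl_modify_append, PySem.Dict.getD_empty]
      simp
    have hgetB : ∀ c : Int,
        byDay.getD c PySem.Set.empty = PySem.Set.ofList (ds0.getD c []) := by
      intro c
      rw [hbd, byDay_getD, PySem.Dict.getD_empty, hgetA c]
      rfl
    have hndslots : ∀ c : Int, (ds0.getD c []).Nodup := by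
      intro c
      rw [hgetA c]
      refine List.Nodup.map_on ?_ (hnd.filter _)
      intro a ha b hb hab
      have ha1 : a.1 = c := by simpa using (List.mem_filter.mp ha).2
      have hb1 : b.1 = c := by simpa using (List.mem_filter.mp hb).2
      exact Prod.ext (ha1.trans hb1.symm) hab
    have hcount : ∀ c : Int, (ds0.getD c []).length = pairs.countP (fun p => p.1 == c) := by
      intro c
      rw [hgetA c]
      simp [List.countP_eq_length_filter]
    have hwk : (([4, 5].map (fun d => (ds0.getD d []).length)).sum >
          ([0, 1, 2, 3].map (fun d => (ds0.getD d []).length)).sum) ↔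
        ((pairs.map (fun p => p.1)).countP (fun d => d == 4 || d == 5) >
          (pairs.map (fun p => p.1)).countP (fun d => d == 0 || d == 1 || d == 2 || d == 3)) := by
      have e45 : (pairs.map (fun p => p.1)).countP (fun d => d == 4 || d == 5) =
          pairs.countP (fun p => p.1 == 4) + pairs.countP (fun p => p.1 == 5) := by
        rw [List.countP_map]
        rw [show ((fun d => d == 4 || d == 5) ∘ fun p : Int × Int => p.1) =
          (fun p : Int × Int => (p.1 == 4) || (p.1 == 5)) from rfl]
        exact countP_or_disjoint pairs _ _
          (by rintro x - ⟨h4, h5⟩; simp only [beq_iff_eq] at h4 h5; omega)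
      have e03 : (pairs.map (fun p => p.1)).countP
            (fun d => d == 0 || d == 1 || d == 2 || d == 3) =
          pairs.countP (fun p => p.1 == 0) + pairs.countP (fun p => p.1 == 1) +
            pairs.countP (fun p => p.1 == 2) + pairs.countP (fun p => p.1 == 3) := by
        rw [List.countP_map]
        rw [show ((fun d => d == 0 || d == 1 || d == 2 || d == 3) ∘ fun p : Int × Int => p.1) =
          (fun p : Int × Int => ((p.1 == 0) || (p.1 == 1) || (p.1 == 2)) || (p.1 == 3)) from rfl]
        rw [countP_or_disjoint pairs _ _
          (by
            rintro x - ⟨ha, hb⟩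
            simp only [Bool.or_eq_true, beq_iff_eq] at ha hb
            omega)]
        rw [countP_or_disjoint pairs _ _
          (by
            rintro x - ⟨ha, hb⟩
            simp only [Bool.or_eq_true, beq_iff_eq] at ha hb
            omega)]
        rw [countP_or_disjoint pairs _ _
          (by rintro x - ⟨ha, hb⟩; simp only [beq_iff_eq] at ha hb; omega)]
      rw [e45, e03]
      simp only [List.map_cons, List.map_nil, List.sum_cons, List.sum_nil, hcount]
      omega
    have hkA : ds0.keys = PySem.Set.ofList (pairs.map (fun p => p.1)) := by
      rw [hds0, PySem.Dict.keys_foldl_modify_key pairs (fun p => p.1) []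
        (fun _ p => (fun l => l ++ [p.2])) PySem.Dict.empty]
      rw [PySem.Dict.keys_empty]
      rfl
    have hkB : byDay.keys = PySem.Set.ofList (pairs.map (fun p => p.1)) := by
      rw [hbd, PySem.Dict.keys_foldl_modify_key pairs (fun p => p.1) PySem.Set.empty
        (fun _ p => (fun s => PySem.Set.add s p.2)) PySem.Dict.empty]
      rw [PySem.Dict.keys_empty]
      rfl
    have hkndA : ds0.keys.Nodup := by rw [hkA]; exact PySem.Set.nodup_ofList _
    have hkndB : byDay.keys.Nodup := by rw [hkB]; exact PySem.Set.nodup_ofList _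
    have hcnt : ds0.values.countP fitnessRun =
        byDay.values.countP (fun s => PySem.Set.issubset (PySem.Set.ofList [1, 2, 3, 4]) s) := by
      rw [PySem.Dict.values_eq_map_keys ds0 hkndA [],
        PySem.Dict.values_eq_map_keys byDay hkndB PySem.Set.empty,
        hkA, hkB, List.countP_map, List.countP_map]
      apply List.countP_congr
      intro k _
      simp only [Function.comp_apply]
      rw [fitnessRun_iff _ (hndslots k), hgetB k, PySem.Set.issubset_iff]
      constructor
      · rintro ⟨q1, q2, q3, q4⟩ x hx
        have hx4 : x ∈ ([1, 2, 3, 4] : List Int) :=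
          (PySem.Set.mem_ofList [(1 : Int), 2, 3, 4] x).mp hx
        rw [PySem.Set.mem_ofList]
        simp only [List.mem_cons, List.not_mem_nil, or_false] at hx4
        rcases hx4 with rfl | rfl | rfl | rfl
        · exact q1
        · exact q2
        · exact q3
        · exact q4
      · intro hsub
        refine ⟨?_, ?_, ?_, ?_⟩ <;>
          rw [← PySem.Set.mem_ofList] <;>
          exact hsub _ ((PySem.Set.mem_ofList [(1 : Int), 2, 3, 4] _).mpr (by simp))
    show (0 + (pairs.map (fun p => popD.getD p 0)).sum,
        ds0.values.foldl (fun pen slots => if fitnessRun slots then pen - 150 else pen)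
          (if ([4, 5].map (fun d => (ds0.getD d []).length)).sum >
              ([0, 1, 2, 3].map (fun d => (ds0.getD d []).length)).sum then (0 : Int) - 50 else 0)) =
      ((pairs.map (fun p => popD.getD p 0)).sum,
        (if (pairs.map (fun p => p.1)).countP (fun d => d == 4 || d == 5) >
            (pairs.map (fun p => p.1)).countP (fun d => d == 0 || d == 1 || d == 2 || d == 3)
          then (-50 : Int) else 0) -
          150 * (byDay.values.countP (fun s => PySem.Set.issubset (PySem.Set.ofList [1, 2, 3, 4]) s) : Int))
    rw [Prod.mk.injEq]
    refine ⟨zero_add _, ?_⟩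
    rw [foldl_if_sub, hcnt, if_congr hwk (show (0 : Int) - 50 = -50 by norm_num) (rfl (a := (0 : Int)))]
  case neg =>
    have hloop : fitnessLoop popD sd.items PySem.Set.empty 0 PySem.Dict.empty = none := by
      rw [fitnessLoop_eq]
      exact if_neg (fun h => hnd h.1)
    have hlen : (PySem.Set.ofList (sd.items.map (fun it => it.2))).length ≠
        (sd.items.map (fun it => it.2)).length :=
      fun h => hnd ((ofList_length_eq_iff_nodup _).mp h)
    simp only [hloop, hv]
    rw [if_pos hlen]

-- ===== VERDICT (by name: the statement is the Claim_ definition above) =====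
theorem fitness_spec : Claim_equal_fitness := by
  intro schedule student_row popularity _
  show fitness schedule student_row popularity = fitness_alt schedule student_row popularity
  exact fitness_core
    (schedule.foldl (fun d t => d.insert t.1 t.2) PySem.Dict.empty)
    (popularity.foldl (fun d t => d.insert (t.1, t.2.1) t.2.2) PySem.Dict.empty)
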